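-- pv_equiv track=rewrite | github.com/AndreyWinz/hello-world-in-every-language | !!Fuck/Interpreters/interpreter.py | fuck2bf
-- ===== SOURCE A (Python) =====
-- def fuck2bf(code):
--     cleancode=''
--     for i in code:
--         if i in '!#':
--             cleancode+=i
--     cp=0
--     table='     ><+-,.[]'
--     b=''
--     while cp<len(cleancode):
--         idx=cleancode.index('#',cp)-cp
--         b+=table[idx]
--         cp+=idx+1
--     return b
-- ===== SOURCE B (Python) =====
-- def fuck2bf(code):
--     table = '     ><+-,.[]'
--     count = 0
--     out = []
--     for ch in code:
--         if ch == '!':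
--             count += 1
--         elif ch == '#':
--             out.append(table[count])
--             count = 0
--     return ''.join(out)
-- ===== Notes on version B (the rewrite author's own statement) =====
-- stated objective: simpler
-- what changed: B replaces A's filter pass plus repeated str.index scanning with a single pass that counts consecutive '!' and emits table[count] at each '#'; A's ValueError on a trailing '!'-run (where B instead ignores the tail and returns) and A's IndexError on an earlier run longer than 12 (where B raises the same IndexError) are excluded by Pre_.
import Mathlib
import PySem

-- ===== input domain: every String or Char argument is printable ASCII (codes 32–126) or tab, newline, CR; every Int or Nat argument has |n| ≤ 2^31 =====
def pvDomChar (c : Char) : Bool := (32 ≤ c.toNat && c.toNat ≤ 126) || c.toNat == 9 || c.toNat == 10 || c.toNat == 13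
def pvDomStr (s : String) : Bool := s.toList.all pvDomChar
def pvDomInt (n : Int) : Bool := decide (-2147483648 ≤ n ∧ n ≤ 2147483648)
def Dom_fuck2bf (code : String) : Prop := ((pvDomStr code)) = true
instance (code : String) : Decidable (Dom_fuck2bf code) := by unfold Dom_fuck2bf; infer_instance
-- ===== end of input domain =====

-- B replaces A's filter pass + repeated str.index with one pass counting consecutive '!';
-- the equivalence is about the return value on Pre_ (inputs where A returns normally).

-- ===== PORT A =====
-- the lookup table '     ><+-,.[]' (5 spaces, then the 8 Brainfuck tokens)
def fuckTable : List Char := [' ', ' ', ' ', ' ', ' ', '>', '<', '+', '-', ',', '.', '[', ']']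

-- the while loop of A, on the suffix of cleancode starting at cp:
-- cleancode.index('#', cp) - cp = index of the first '#' in the suffix (ValueError → none → stop, outside Pre_);
-- table[idx] out of range (IndexError) → none → stop, outside Pre_.
def fuckGo : List Char → List Char → List Char
  | rest, b =>
    match h : rest.findIdx? (· == '#') with
    | none => b
    | some idx =>
      match fuckTable[idx]? with
      | none => b
      | some c => fuckGo (rest.drop (idx + 1)) (b ++ [c])
  termination_by rest _ => rest.length
  decreasing_by
    have := List.findIdx?_eq_some_iff_findIdx_eq.mp h
    simp [List.length_drop]; omega

-- one step of A's filter loop: cleancode += i when i in '!#'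
def fuckFilt (cc : List Char) (i : Char) : List Char :=
  if i == '!' || i == '#' then cc ++ [i] else cc

def fuck2bf (code : String) : String :=
  let cleancode := code.toList.foldl fuckFilt []
  String.mk (fuckGo cleancode [])

-- ===== PORT B =====
-- one step of B's single pass: count consecutive '!', emit table[count] at '#'
-- (table[count] out of range = IndexError in Source B → none → emit nothing, outside Pre_)
def fuckStep (s : Nat × List Char) (i : Char) : Nat × List Char :=
  if i == '!' then (s.1 + 1, s.2)
  else if i == '#' then
    match fuckTable[s.1]? with
    | some c => (0, s.2 ++ [c])
    | none => (0, s.2)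
  else s

def fuck2bf_alt (code : String) : String :=
  String.mk ((code.toList.foldl fuckStep (0, [])).2)

-- ===== PRECONDITION & SPEC =====
-- Pre_ excludes inputs on which A raises: a trailing '!'-run with no closing '#' (ValueError from
-- str.index) and a run of 13 or more '!' before some '#' (IndexError from table[idx]).
def Pre_fuck2bf (code : String) : Prop :=
  ((code.toList.filter (fun c => c == '!' || c == '#')).getLast? = some '#' ∨
    code.toList.filter (fun c => c == '!' || c == '#') = []) ∧
  ¬ (List.replicate 13 '!' <:+: code.toList.filter (fun c => c == '!' || c == '#'))
instance (code : String) : Decidable (Pre_fuck2bf code) := by unfold Pre_fuck2bf; infer_instance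

def pvWitness_fuck2bf : String := "!!!!!# comment !!!!!!#!#"

def Spec_fuck2bf (code : String) (out : String) : Prop := out = fuck2bf_alt code
instance (code : String) (out : String) : Decidable (Spec_fuck2bf code out) := by unfold Spec_fuck2bf; infer_instance

-- ===== CLAIM (what is proved, stated in full; the proofs are below) =====
def Claim_equal_fuck2bf : Prop := ∀ (code : String), Dom_fuck2bf code → Pre_fuck2bf code → Spec_fuck2bf code (fuck2bf code)

-- ===== LEMMAS AND PROOFS =====

def fuckP (c : Char) : Bool := c == '!' || c == '#'

lemma filter_loop (l : List Char) (cc : List Char) :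
    l.foldl fuckFilt cc = cc ++ l.filter fuckP := by
  induction l generalizing cc with
  | nil => simp
  | cons a t ih =>
    rw [List.foldl_cons, List.filter_cons]
    by_cases h : (a == '!' || a == '#') = true
    · have hp : fuckP a = true := h
      rw [ih]
      simp [fuckFilt, fuckP, h]
    · have hp : fuckP a = false := by simpa [fuckP] using h
      rw [ih]
      simp [fuckFilt, fuckP, h]

lemma fold_skip (l : List Char) (s : Nat × List Char) :
    l.foldl fuckStep s = (l.filter fuckP).foldl fuckStep s := by
  induction l generalizing s with
  | nil => rfl
  | cons a t ih =>
    rw [List.foldl_cons, List.filter_cons]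
    by_cases h : fuckP a = true
    · rw [if_pos (by simpa [fuckP] using h), List.foldl_cons, ih]
    · have hb : (a == '!' || a == '#') = false := by simpa [fuckP] using h
      have h1 : (a == '!') = false := (Bool.or_eq_false_iff.mp hb).1
      have h2 : (a == '#') = false := (Bool.or_eq_false_iff.mp hb).2
      rw [if_neg (by simp [fuckP, hb]), ih]
      congr 1
      simp [fuckStep, h1, h2]

lemma fold_acc (l : List Char) (n : Nat) (a : List Char) :
    l.foldl fuckStep (n, a) =
      ((l.foldl fuckStep (n, [])).1, a ++ (l.foldl fuckStep (n, [])).2) := by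
  induction l generalizing n a with
  | nil => simp
  | cons c t ih =>
    rw [List.foldl_cons, List.foldl_cons]
    by_cases h1 : (c == '!') = true
    · have : ∀ b : List Char, fuckStep (n, b) c = (n + 1, b) := by
        intro b; simp [fuckStep, h1]
      rw [this, this]; exact ih _ _
    · by_cases h2 : (c == '#') = true
      · cases htab : fuckTable[n]? with
        | none =>
          have : ∀ b : List Char, fuckStep (n, b) c = (0, b) := by
            intro b; simp [fuckStep, h1, h2, htab]
          rw [this, this]; exact ih _ _
        | some ch =>
          have : ∀ b : List Char, fuckStep (n, b) c = (0, b ++ [ch]) := by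
            intro b; simp [fuckStep, h1, h2, htab]
          rw [this, this, ih 0 (a ++ [ch]), ih 0 ([] ++ [ch])]
          simp
      · have : ∀ b : List Char, fuckStep (n, b) c = (n, b) := by
          intro b; simp [fuckStep, h1, h2]
        rw [this, this]; exact ih _ _

lemma fold_bangs (k : Nat) (n : Nat) (a : List Char) :
    (List.replicate k '!').foldl fuckStep (n, a) = (n + k, a) := by
  induction k generalizing n with
  | zero => simp
  | succ m ih =>
    have hs : fuckStep (n, a) '!' = (n + 1, a) := by simp [fuckStep]
    rw [List.replicate_succ, List.foldl_cons, hs, ih]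
    congr 1
    omega

lemma findIdx_decomp (l : List Char) (idx : Nat)
    (hall : ∀ c ∈ l, fuckP c = true)
    (h : l.findIdx? (· == '#') = some idx) :
    l = List.replicate idx '!' ++ '#' :: l.drop (idx + 1) := by
  obtain ⟨hlt, hhit, hbefore⟩ := List.findIdx?_eq_some_iff_getElem.mp h
  have htake : l.take idx = List.replicate idx '!' := by
    apply List.ext_getElem
    · simp [List.length_take]; omega
    · intro i h1 h2
      have hi : i < idx := by simpa [List.length_take] using h2
      have hil : i < l.length := by omega
      have hb : ¬ ((l[i] == '#') = true) := by
        have := hbefore i hi; simpa using this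
      have hp := hall l[i] (List.getElem_mem hil)
      have : (l[i] == '!') = true := by
        simp only [fuckP, Bool.or_eq_true] at hp
        rcases hp with h' | h'
        · exact h'
        · exact absurd h' hb
      simp [List.getElem_take, List.getElem_replicate]
      exact eq_of_beq this
  have hget : l[idx] = '#' := eq_of_beq (by simpa using hhit)
  conv_lhs => rw [← List.take_append_drop idx l]
  rw [htake, List.drop_eq_getElem_cons hlt, hget]

lemma main_go_n : ∀ (n : Nat) (rest : List Char), rest.length = n →
    (∀ c ∈ rest, fuckP c = true) →
    (rest.getLast? = some '#' ∨ rest = []) →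
    ¬ (List.replicate 13 '!' <:+: rest) →
    ∀ b, fuckGo rest b = b ++ (rest.foldl fuckStep (0, [])).2 := by
  intro n
  induction n using Nat.strong_induction_on with
  | _ n IH =>
  intro rest hlen hall hend hrun b
  cases hfind : rest.findIdx? (· == '#') with
  | none =>
    have hrest : rest = [] := by
      rcases hend with hlast | hnil
      · exfalso
        have hmem : '#' ∈ rest := List.mem_of_getLast? hlast
        have := List.findIdx?_eq_none_iff.mp hfind '#' hmem
        simp at this
      · exact hnil
    subst hrest
    simp [fuckGo]
  | some idx =>
    have hdecomp := findIdx_decomp rest idx hall hfind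
    obtain ⟨hlt, -, -⟩ := List.findIdx?_eq_some_iff_getElem.mp hfind
    -- idx ≤ 12: otherwise a run of 13 '!' would be an infix of rest
    have hidx : idx < 13 := by
      by_contra hge
      rw [Nat.not_lt] at hge
      apply hrun
      refine ⟨[], List.replicate (idx - 13) '!' ++ '#' :: rest.drop (idx + 1), ?_⟩
      have hsplit : List.replicate idx '!' =
          List.replicate 13 '!' ++ List.replicate (idx - 13) '!' := by
        rw [← List.replicate_add]
        congr 1
        omega
      rw [List.nil_append, ← List.append_assoc, ← hsplit, ← hdecomp]
    have htab : ∃ c, fuckTable[idx]? = some c := by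
      have : idx < fuckTable.length := by simp [fuckTable]; omega
      exact ⟨fuckTable[idx], List.getElem?_eq_getElem this⟩
    obtain ⟨c, htab⟩ := htab
    have hstep : fuckGo rest b = fuckGo (rest.drop (idx + 1)) (b ++ [c]) := by
      rw [fuckGo]; rw [hfind]; simp [htab]
    set rest' := rest.drop (idx + 1) with hrest'
    have hinfix : rest' <:+: rest := (List.drop_suffix _ _).isInfix
    have hall' : ∀ c ∈ rest', fuckP c = true := fun c hc => hall c (hinfix.mem hc)
    have hend' : rest'.getLast? = some '#' ∨ rest' = [] := by
      by_cases hnil : rest' = []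
      · right; exact hnil
      · left
        rcases hend with hlast | hrnil
        · rw [hdecomp] at hlast
          rw [List.getLast?_append_of_ne_nil _ (by simp)] at hlast
          have : ('#' :: rest') = ['#'] ++ rest' := by simp
          rw [this, List.getLast?_append_of_ne_nil _ hnil] at hlast
          exact hlast
        · rw [hrnil] at hdecomp; simp at hdecomp
    have hrun' : ¬ (List.replicate 13 '!' <:+: rest') := fun h => hrun (h.trans hinfix)
    have hlen' : rest'.length < n := by
      rw [← hlen, hrest']; simp [List.length_drop]; omega
    have hIH := IH rest'.length hlen' rest' rfl hall' hend' hrun' (b ++ [c])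
    rw [hstep, hIH]
    -- compute the B-side fold on rest via the decomposition
    conv_rhs => rw [hdecomp]
    rw [List.foldl_append, fold_bangs, List.foldl_cons]
    have hstep2 : fuckStep (0 + idx, ([] : List Char)) '#' = (0, [c]) := by
      simp [fuckStep, htab]
    rw [hstep2, fold_acc _ 0 [c]]
    simp

lemma main_go (rest : List Char)
    (hall : ∀ c ∈ rest, fuckP c = true)
    (hend : rest.getLast? = some '#' ∨ rest = [])
    (hrun : ¬ (List.replicate 13 '!' <:+: rest))
    (b : List Char) : fuckGo rest b = b ++ (rest.foldl fuckStep (0, [])).2 :=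
  main_go_n rest.length rest rfl hall hend hrun b

lemma fuck2bf_eq (code : String) (h : Pre_fuck2bf code) :
    fuck2bf code = fuck2bf_alt code := by
  obtain ⟨hend, hrun⟩ := h
  unfold fuck2bf fuck2bf_alt
  rw [filter_loop, fold_skip]
  simp only [List.nil_append]
  have hall : ∀ c ∈ code.toList.filter fuckP, fuckP c = true := by
    intro c hc; exact (List.mem_filter.mp hc).2
  have hend' : (code.toList.filter fuckP).getLast? = some '#' ∨ code.toList.filter fuckP = [] := by
    exact hend
  have hrun' : ¬ (List.replicate 13 '!' <:+: code.toList.filter fuckP) := hrun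
  rw [main_go _ hall hend' hrun' []]
  simp

-- ===== VERDICT (by name: the statement is the Claim_ definition above) =====
theorem fuck2bf_spec : Claim_equal_fuck2bf := by
  intro code _ hpre
  unfold Spec_fuck2bf
  exact fuck2bf_eq code hpre
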